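-- pv_equiv track=rewrite | github.com/stevenstetzler/advent-of-code-2021 | day_17/solution_33.py | evaluate_trajectory_y
-- ===== SOURCE A (Python) =====
-- def evaluate_trajectory_y(vy, ymin, ymax):
--     y = 0
--     i = 0
--     in_target_times_and_velocities = []
--     while True:
--         i += 1
--         y += vy
--         vy -= 1
--         if (y <= ymax) and (y >= ymin):
--             in_target_times_and_velocities.append((i, vy))
--         # has passed target
--         if y < ymin:
--             break
--     return in_target_times_and_velocities
-- ===== SOURCE B (Python) =====
-- def evaluate_trajectory_y(vy, ymin, ymax):
--     # closed-form position: y(i) = i*vy - i*(i-1)/2 (sum of vy, vy-1, ..., vy-i+1)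
--     def y(i):
--         return i * vy - i * (i - 1) // 2
--     # first step at which the probe is below the target band (loop end of the simulation)
--     n = 1
--     while y(n) >= ymin:
--         n += 1
--     return [(i, vy - i) for i in range(1, n + 1) if ymin <= y(i) <= ymax]
-- ===== Notes on version B (the rewrite author's own statement) =====
-- stated objective: alternative
-- what changed: B replaces A's single stateful simulation (running position, running velocity and an accumulator list mutated in one while-loop) by the closed-form position y(i)=i*vy-i*(i-1)//2: a bare counter loop that only locates the first step n whose position falls below ymin, followed by a filtering comprehension over range(1, n+1).
import Mathlib
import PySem

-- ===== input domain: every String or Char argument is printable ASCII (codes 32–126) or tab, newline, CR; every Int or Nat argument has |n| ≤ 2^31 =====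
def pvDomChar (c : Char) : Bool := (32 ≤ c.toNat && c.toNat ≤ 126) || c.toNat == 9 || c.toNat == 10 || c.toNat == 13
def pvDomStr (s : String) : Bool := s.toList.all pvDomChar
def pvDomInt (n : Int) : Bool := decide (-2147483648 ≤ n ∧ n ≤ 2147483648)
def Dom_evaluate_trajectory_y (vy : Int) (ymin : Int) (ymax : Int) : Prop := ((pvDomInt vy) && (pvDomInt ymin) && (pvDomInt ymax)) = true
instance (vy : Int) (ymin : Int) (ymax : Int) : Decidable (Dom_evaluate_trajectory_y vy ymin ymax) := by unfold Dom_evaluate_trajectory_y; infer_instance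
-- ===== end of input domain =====

-- B replaces A's stateful step-by-step simulation with the closed-form position, a bare
-- counter loop finding the first below-band step, and a filtering comprehension (objective: alternative).
-- Both loops carry a Nat fuel guard for totality only; the fuel is proved sufficient below
-- (the Python loops always terminate), so it never changes the computed value.

-- ===== PORT A =====
-- A's while-True loop: state (y, vy, i, acc); one iteration adds vy to y, decrements vy,
-- increments i, appends (i, vy) when in band, breaks when y < ymin.
def evalLoopA (ymin ymax : Int) (fuel : Nat) (y vy i : Int) (acc : List (Int × Int)) : List (Int × Int) :=
  match fuel with
  | 0 => acc
  | fuel + 1 =>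
    if y + vy < ymin then
      (if y + vy ≤ ymax ∧ ymin ≤ y + vy then acc ++ [(i + 1, vy - 1)] else acc)
    else
      evalLoopA ymin ymax fuel (y + vy) (vy - 1) (i + 1)
        (if y + vy ≤ ymax ∧ ymin ≤ y + vy then acc ++ [(i + 1, vy - 1)] else acc)

def evaluate_trajectory_y (vy : Int) (ymin : Int) (ymax : Int) : List (Int × Int) :=
  evalLoopA ymin ymax (2 * vy.natAbs + 2 * ymin.natAbs + 4) 0 vy 0 []

-- ===== PORT B =====
-- closed-form position after i steps: y(i) = i*vy - i*(i-1)//2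
def yPos (vy i : Int) : Int := i * vy - PySem.Int.floordiv (i * (i - 1)) 2

-- B's counter loop: smallest n ≥ start with y(n) < ymin
def findBelow (vy ymin : Int) (fuel : Nat) (n : Int) : Int :=
  match fuel with
  | 0 => n
  | fuel + 1 => if ymin ≤ yPos vy n then findBelow vy ymin fuel (n + 1) else n

def evaluate_trajectory_y_alt (vy : Int) (ymin : Int) (ymax : Int) : List (Int × Int) :=
  let n := findBelow vy ymin (2 * vy.natAbs + 2 * ymin.natAbs + 4) 1
  ((PySem.List.pyRange 1 (n + 1) 1).filter
      (fun i => decide (ymin ≤ yPos vy i ∧ yPos vy i ≤ ymax))).map (fun i => (i, vy - i))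

-- ===== PRECONDITION & SPEC =====
def Spec_evaluate_trajectory_y (vy : Int) (ymin : Int) (ymax : Int) (out : List (Int × Int)) : Prop := out = evaluate_trajectory_y_alt vy ymin ymax
instance (vy : Int) (ymin : Int) (ymax : Int) (out : List (Int × Int)) : Decidable (Spec_evaluate_trajectory_y vy ymin ymax out) := by unfold Spec_evaluate_trajectory_y; infer_instance

-- ===== CLAIM (what is proved, stated in full; the proofs are below) =====
def Claim_equal_evaluate_trajectory_y : Prop := ∀ (vy : Int) (ymin : Int) (ymax : Int), Dom_evaluate_trajectory_y vy ymin ymax → Spec_evaluate_trajectory_y vy ymin ymax (evaluate_trajectory_y vy ymin ymax)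

-- ===== LEMMAS AND PROOFS =====
lemma yPos_succ (vy i : Int) : yPos vy (i + 1) = yPos vy i + (vy - i) := by
  unfold yPos
  rw [PySem.Int.floordiv_eq_ediv_of_pos (by norm_num), PySem.Int.floordiv_eq_ediv_of_pos (by norm_num)]
  have h : (i + 1) * ((i + 1) - 1) = i * (i - 1) + i * 2 := by ring
  rw [h, Int.add_mul_ediv_right _ _ (by norm_num : (2:Int) ≠ 0)]
  ring

lemma yPos_zero (vy : Int) : yPos vy 0 = 0 := by
  unfold yPos
  rw [PySem.Int.floordiv_eq_ediv_of_pos (by norm_num)]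
  norm_num

-- fuel sufficiency: far enough out, the position is below the band for good
lemma yPos_big (vy ymin n : Int) (hn : 2 * vy.natAbs + 2 * ymin.natAbs + 2 ≤ n) :
    yPos vy n < ymin := by
  obtain ⟨c, hc⟩ : ∃ c, n * (n - 1) = 2 * c := by
    rcases Int.even_mul_succ_self (n - 1) with ⟨c, hc⟩
    exact ⟨c, by linarith [hc]⟩
  have hy : yPos vy n = n * vy - c := by
    unfold yPos
    rw [PySem.Int.floordiv_eq_ediv_of_pos (by norm_num), hc,
        Int.mul_ediv_cancel_left _ (by norm_num : (2:Int) ≠ 0)]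
  rw [hy]
  have ha : (vy.natAbs : Int) = |vy| := Int.abs_eq_natAbs vy |>.symm
  have hb : (ymin.natAbs : Int) = |ymin| := Int.abs_eq_natAbs ymin |>.symm
  have h1 : |vy| ≥ vy := le_abs_self vy
  have h2 : |vy| ≥ 0 := abs_nonneg vy
  have h3 : -|ymin| ≤ ymin := neg_abs_le ymin
  have h4 : |ymin| ≥ 0 := abs_nonneg ymin
  have hn' : 2 * |vy| + 2 * |ymin| + 2 ≤ n := by
    have : ((2 * vy.natAbs + 2 * ymin.natAbs + 2 : Nat) : Int) ≤ n := by exact_mod_cast hn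
    push_cast at this
    omega
  nlinarith [mul_le_mul_of_nonneg_left h1 (by omega : (0:Int) ≤ n),
             mul_nonneg (by omega : (0:Int) ≤ n) h4,
             mul_le_mul_of_nonneg_left (by omega : 2 * |vy| + 2 * |ymin| + 2 ≤ n) (by omega : (0:Int) ≤ n)]

lemma findBelow_ge (vy ymin : Int) : ∀ (f : Nat) (n : Int), n ≤ findBelow vy ymin f n := by
  intro f
  induction f with
  | zero => intro n; simp [findBelow]
  | succ f ih =>
    intro n
    rw [findBelow]
    split
    · exact le_trans (by omega) (ih (n + 1))
    · omega

lemma loopA_eq (ymin ymax vy : Int) :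
    ∀ (f : Nat) (i : Int) (acc : List (Int × Int)),
      yPos vy (i + (f : Int) + 1) < ymin →
      evalLoopA ymin ymax (f + 1) (yPos vy i) (vy - i) i acc =
        acc ++ ((PySem.List.pyRange (i + 1) (findBelow vy ymin (f + 1) (i + 1) + 1) 1).filter
            (fun j => decide (ymin ≤ yPos vy j ∧ yPos vy j ≤ ymax))).map (fun j => (j, vy - j)) := by
  intro f
  induction f with
  | zero =>
    intro i acc hstop
    have hlt : yPos vy (i + 1) < ymin := by simpa using hstop
    have hsucc : yPos vy i + (vy - i) = yPos vy (i + 1) := (yPos_succ vy i).symm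
    rw [evalLoopA, if_pos (by omega), if_neg (by rw [hsucc]; omega)]
    rw [findBelow, if_neg (by omega), PySem.List.pyRange_one_singleton (i + 1)]
    simp [show ¬ (ymin ≤ yPos vy (i + 1) ∧ yPos vy (i + 1) ≤ ymax) by omega]
  | succ f ih =>
    intro i acc hstop
    have hsucc : yPos vy i + (vy - i) = yPos vy (i + 1) := (yPos_succ vy i).symm
    rw [evalLoopA]
    by_cases hlt : yPos vy (i + 1) < ymin
    · -- break step: not in band, range is a singleton filtered away
      rw [if_pos (by omega), if_neg (by rw [hsucc]; omega)]
      rw [findBelow, if_neg (by omega), PySem.List.pyRange_one_singleton (i + 1)]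
      simp [show ¬ (ymin ≤ yPos vy (i + 1) ∧ yPos vy (i + 1) ≤ ymax) by omega]
    · -- continue: y(i+1) ≥ ymin
      have hge : ymin ≤ yPos vy (i + 1) := by omega
      have hstop' : yPos vy ((i + 1) + (f : Int) + 1) < ymin := by
        have he : (i + 1) + (f : Int) + 1 = i + ((f : Nat) + 1 : Nat) + 1 := by push_cast; ring
        rw [he]; exact hstop
      have hN : findBelow vy ymin (f + 1 + 1) (i + 1) = findBelow vy ymin (f + 1) (i + 1 + 1) := by
        rw [findBelow, if_pos hge]
      have hgen : i + 1 + 1 ≤ findBelow vy ymin (f + 1) (i + 1 + 1) := findBelow_ge vy ymin (f + 1) (i + 1 + 1)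
      rw [if_neg (by omega), hsucc, show vy - i - 1 = vy - (i + 1) by ring]
      rw [ih (i + 1) _ hstop', hN]
      rw [PySem.List.pyRange_one_cons (by omega : (i:Int) + 1 < findBelow vy ymin (f + 1) (i + 1 + 1) + 1)]
      by_cases hM : yPos vy (i + 1) ≤ ymax
      · simp [hge, hM]
      · simp [hge, hM]

-- ===== VERDICT (by name: the statement is the Claim_ definition above) =====
theorem evaluate_trajectory_y_spec : Claim_equal_evaluate_trajectory_y := by
  intro vy ymin ymax _
  unfold Spec_evaluate_trajectory_y evaluate_trajectory_y evaluate_trajectory_y_alt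
  have hstop : yPos vy (0 + ((2 * vy.natAbs + 2 * ymin.natAbs + 3 : Nat) : Int) + 1) < ymin := by
    apply yPos_big
    push_cast
    omega
  have h := loopA_eq ymin ymax vy (2 * vy.natAbs + 2 * ymin.natAbs + 3) 0 [] hstop
  rw [yPos_zero, sub_zero] at h
  have hf : (2 * vy.natAbs + 2 * ymin.natAbs + 3) + 1 = 2 * vy.natAbs + 2 * ymin.natAbs + 4 := by omega
  rw [hf] at h
  simpa using h
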